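-- pv_equiv track=rewrite | github.com/MrSchrodingers/fastapi-router | app/utils.py | normalize_document_by_type
-- ===== SOURCE A (Python) =====
-- from typing import List, Dict
--
-- def only_digits(s: str | None) -> str:
--     return "".join(ch for ch in (s or "") if ch.isdigit())
--
-- def normalize_document_by_type(document: str, person_type: str) -> List[str]:
--     """
--     Reproduz a lógica de normalização: limpa, ajusta zeros à esquerda e tenta
--     variações coerentes para o tipo (PF=11, PJ=14). Mantém ordem e sem duplicar.
--     """
--     clean = only_digits(document)
--     if not clean:
--         return []
--
--     variants: List[str] = []
--
--     # tamanho alvo por tipo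
--     if person_type.upper() == "PF":
--         target = 11
--     elif person_type.upper() == "PJ":
--         target = 14
--     else:
--         # indefinido: tenta ambos e deduplica
--         pf = normalize_document_by_type(document, "PF")
--         pj = normalize_document_by_type(document, "PJ")
--         seen = set()
--         out = []
--         for v in pf + pj:
--             if v not in seen:
--                 seen.add(v)
--                 out.append(v)
--         return out
--
--     if len(clean) >= target:
--         base = clean[-target:]
--         variants.append(base)
--         stripped = base.lstrip("0")
--         if stripped and stripped != base:
--             variants.append(stripped)
--     else:
--         padded = clean.zfill(target)
--         variants.append(padded)
--         stripped = clean.lstrip("0")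
--         if stripped:
--             variants.append(stripped)
--
--     # dedup mantendo ordem
--     seen = set()
--     uniq: List[str] = []
--     for v in variants:
--         if v and v not in seen:
--             seen.add(v)
--             uniq.append(v)
--     return uniq
-- ===== SOURCE B (Python) =====
-- from typing import List
--
-- def normalize_document_by_type(document: str, person_type: str) -> List[str]:
--     # Same normalization, different decomposition: pick the list of target sizes,
--     # then for each target emit exactly two candidates -- the size-adjusted form
--     # (last `target` digits, or zero-padded) and its lstrip("0") -- and let one
--     # shared order-preserving dedup (which also drops empty strings) do all the
--     # per-branch filtering A performs explicitly.
--     clean = "".join(ch for ch in (document or "") if ch.isdigit())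
--     if not clean:
--         return []
--     pt = person_type.upper()
--     if pt == "PF":
--         targets = [11]
--     elif pt == "PJ":
--         targets = [14]
--     else:
--         targets = [11, 14]
--     seen = set()
--     out: List[str] = []
--     for t in targets:
--         primary = clean[-t:] if len(clean) >= t else clean.zfill(t)
--         for v in (primary, primary.lstrip("0")):
--             if v and v not in seen:
--                 seen.add(v)
--                 out.append(v)
--     return out
-- ===== Notes on version B (the rewrite author's own statement) =====
-- stated objective: simpler
-- what changed: Replaces A's self-recursion on person_type and its three separate dedup passes (per-branch append conditions plus a merging dedup) by a target-size list, exactly two candidates per target (size-adjusted form and its lstrip('0')), and one shared order-preserving dedup that also drops empties.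
import Mathlib
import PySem

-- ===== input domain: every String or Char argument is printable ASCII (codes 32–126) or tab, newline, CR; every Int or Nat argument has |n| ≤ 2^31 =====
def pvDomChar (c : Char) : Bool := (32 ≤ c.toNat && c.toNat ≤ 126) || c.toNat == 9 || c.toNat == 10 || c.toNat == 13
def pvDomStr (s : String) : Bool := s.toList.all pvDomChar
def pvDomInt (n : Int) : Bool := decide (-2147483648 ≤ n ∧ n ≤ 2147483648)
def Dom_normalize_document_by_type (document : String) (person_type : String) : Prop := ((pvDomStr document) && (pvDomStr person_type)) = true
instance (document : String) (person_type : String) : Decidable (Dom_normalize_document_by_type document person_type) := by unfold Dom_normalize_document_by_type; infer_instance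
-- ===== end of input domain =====

-- B replaces A's self-recursion on person_type and its three separate dedup passes by a
-- target-size list, two fixed candidates per target, and one shared dedup loop (objective: simpler).

-- ===== PORT A =====

-- port of only_digits: "".join(ch for ch in (s or "") if ch.isdigit()); exact on the ASCII domain
def pvOnlyDigits (s : String) : String :=
  String.ofList (s.toList.filter PySem.Chars.isdigit)

-- hand port of s.lstrip("0") (no PySem primitive takes a char argument for lstrip): exact —
-- drops exactly the leading '0' characters
def pvLstrip0 (s : String) : String :=
  String.ofList (s.toList.dropWhile (· == '0'))

-- the body between "if len(clean) >= target" and the final dedup loop of A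
def pvVariantsA (clean : String) (target : Int) : List String :=
  if (clean.length : Int) ≥ target then
    let base := PySem.Str.slice clean (some (-target)) none
    let stripped := pvLstrip0 base
    [base] ++ (if stripped ≠ "" ∧ stripped ≠ base then [stripped] else [])
  else
    let padded := PySem.Str.zfill clean target
    let stripped := pvLstrip0 clean
    [padded] ++ (if stripped ≠ "" then [stripped] else [])

-- A's final dedup loop: "for v in variants: if v and v not in seen: …"
def pvDedupNE (vs : List String) : List String :=
  (vs.foldl (fun (st : PySem.Set String × List String) v =>
      if v ≠ "" ∧ v ∉ st.1 then (PySem.Set.add st.1 v, st.2 ++ [v]) else st)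
    (PySem.Set.empty, [])).2

-- A's merging dedup loop in the undefined-person_type branch: "if v not in seen: …" (no emptiness test)
def pvDedup (vs : List String) : List String :=
  (vs.foldl (fun (st : PySem.Set String × List String) v =>
      if v ∉ st.1 then (PySem.Set.add st.1 v, st.2 ++ [v]) else st)
    (PySem.Set.empty, [])).2

def normalize_document_by_type (document : String) (person_type : String) : List String :=
  let clean := pvOnlyDigits document
  if clean = "" then []
  else if PySem.Str.upper person_type = "PF" then
    pvDedupNE (pvVariantsA clean 11)
  else if PySem.Str.upper person_type = "PJ" then
    pvDedupNE (pvVariantsA clean 14)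
  else
    pvDedup (normalize_document_by_type document "PF" ++ normalize_document_by_type document "PJ")
termination_by (if PySem.Str.upper person_type = "PF" ∨ PySem.Str.upper person_type = "PJ" then 0 else 1 : Nat)
decreasing_by
  · simp_all [PySem.Str.upper]; decide
  · simp_all [PySem.Str.upper]; decide

-- ===== PORT B =====

def normalize_document_by_type_alt (document : String) (person_type : String) : List String :=
  let clean := String.ofList (document.toList.filter PySem.Chars.isdigit)
  if clean = "" then []
  else
    let pt := PySem.Str.upper person_type
    let targets : List Int := if pt = "PF" then [11] else if pt = "PJ" then [14] else [11, 14]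
    (targets.foldl (fun st t =>
        let primary :=
          if (clean.length : Int) ≥ t then PySem.Str.slice clean (some (-t)) none
          else PySem.Str.zfill clean t
        [primary, String.ofList (primary.toList.dropWhile (· == '0'))].foldl
          (fun (st : PySem.Set String × List String) v =>
            if v ≠ "" ∧ v ∉ st.1 then (PySem.Set.add st.1 v, st.2 ++ [v]) else st) st)
      (PySem.Set.empty, [])).2

-- ===== PRECONDITION & SPEC =====
def Spec_normalize_document_by_type (document : String) (person_type : String) (out : List String) : Prop := out = normalize_document_by_type_alt document person_type
instance (document : String) (person_type : String) (out : List String) : Decidable (Spec_normalize_document_by_type document person_type out) := by unfold Spec_normalize_document_by_type; infer_instance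

-- ===== CLAIM (what is proved, stated in full; the proofs are below) =====
def Claim_equal_normalize_document_by_type : Prop := ∀ (document : String) (person_type : String), Dom_normalize_document_by_type document person_type → Spec_normalize_document_by_type document person_type (normalize_document_by_type document person_type)

-- ===== LEMMAS AND PROOFS =====


-- proof-only helpers: a recursive description of the two dedup loops
def pvKNE : String → Bool := fun v => !(v == "")
def pvKAll : String → Bool := fun _ => true

def pvDD (keep : String → Bool) (seen : PySem.Set String) : List String → List String
  | [] => []
  | v :: r => if keep v = true ∧ v ∉ seen then v :: pvDD keep (PySem.Set.add seen v) r else pvDD keep seen r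

def pvPost (keep : String → Bool) (seen : PySem.Set String) : List String → PySem.Set String
  | [] => seen
  | v :: r => if keep v = true ∧ v ∉ seen then pvPost keep (PySem.Set.add seen v) r else pvPost keep seen r

-- B's size-adjusted primary candidate (the `primary` let of the alt port)
def pvPrim (clean : String) (t : Int) : String :=
  if (clean.length : Int) ≥ t then PySem.Str.slice clean (some (-t)) none
  else PySem.Str.zfill clean t

theorem pvFoldNE_spec (vs : List String) : ∀ (seen : PySem.Set String) (out : List String),
    vs.foldl (fun (st : PySem.Set String × List String) v =>
        if v ≠ "" ∧ v ∉ st.1 then (PySem.Set.add st.1 v, st.2 ++ [v]) else st) (seen, out)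
      = (pvPost pvKNE seen vs, out ++ pvDD pvKNE seen vs) := by
  induction vs with
  | nil => intro seen out; simp [pvDD, pvPost]
  | cons v r ih =>
    intro seen out
    simp only [List.foldl_cons, pvDD, pvPost]
    by_cases h : v ≠ "" ∧ v ∉ seen
    · have hk : pvKNE v = true ∧ v ∉ seen := ⟨by simp [pvKNE, h.1], h.2⟩
      rw [if_pos h, if_pos hk, if_pos hk, ih]
      simp
    · have hk : ¬ (pvKNE v = true ∧ v ∉ seen) := by
        intro hc; exact h ⟨by simpa [pvKNE] using hc.1, hc.2⟩
      rw [if_neg h, if_neg hk, if_neg hk, ih]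

theorem pvFoldAll_spec (vs : List String) : ∀ (seen : PySem.Set String) (out : List String),
    vs.foldl (fun (st : PySem.Set String × List String) v =>
        if v ∉ st.1 then (PySem.Set.add st.1 v, st.2 ++ [v]) else st) (seen, out)
      = (pvPost pvKAll seen vs, out ++ pvDD pvKAll seen vs) := by
  induction vs with
  | nil => intro seen out; simp [pvDD, pvPost]
  | cons v r ih =>
    intro seen out
    simp only [List.foldl_cons, pvDD, pvPost]
    by_cases h : v ∉ seen
    · have hk : pvKAll v = true ∧ v ∉ seen := ⟨rfl, h⟩
      rw [if_pos h, if_pos hk, if_pos hk, ih]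
      simp
    · have hk : ¬ (pvKAll v = true ∧ v ∉ seen) := by intro hc; exact h hc.2
      rw [if_neg h, if_neg hk, if_neg hk, ih]

theorem pvDD_append (k : String → Bool) (a : List String) : ∀ (b : List String) (seen : PySem.Set String),
    pvDD k seen (a ++ b) = pvDD k seen a ++ pvDD k (pvPost k seen a) b := by
  induction a with
  | nil => intro b seen; simp [pvDD, pvPost]
  | cons v r ih =>
    intro b seen
    simp only [List.cons_append, pvDD, pvPost]
    by_cases h : k v = true ∧ v ∉ seen
    · rw [if_pos h, if_pos h, if_pos h, ih, List.cons_append]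
    · rw [if_neg h, if_neg h, if_neg h, ih]

theorem pvMem_post (k : String → Bool) (vs : List String) : ∀ (seen : PySem.Set String) (v : String),
    v ∈ pvPost k seen vs ↔ v ∈ seen ∨ v ∈ pvDD k seen vs := by
  induction vs with
  | nil => intro seen v; simp [pvDD, pvPost]
  | cons w r ih =>
    intro seen v
    simp only [pvDD, pvPost]
    by_cases h : k w = true ∧ w ∉ seen
    · rw [if_pos h, if_pos h, ih]
      rw [PySem.Set.mem_add]
      simp only [List.mem_cons]
      tauto
    · rw [if_neg h, if_neg h, ih]

theorem pvDD_all_ne (y : List String) : ∀ (S s₀ U : PySem.Set String),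
    (∀ v, v ∈ U ↔ v ∈ S ∨ v ∈ s₀) →
    pvDD pvKAll S (pvDD pvKNE s₀ y) = pvDD pvKNE U y := by
  induction y with
  | nil => intro S s₀ U _; simp [pvDD]
  | cons v r ih =>
    intro S s₀ U hU
    simp only [pvDD]
    by_cases hk : pvKNE v = true ∧ v ∉ s₀
    · by_cases hS : v ∈ S
      · have hvU : v ∈ U := (hU v).2 (Or.inl hS)
        have h1 : ¬ (pvKAll v = true ∧ v ∉ S) := by intro hc; exact hc.2 hS
        have h2 : ¬ (pvKNE v = true ∧ v ∉ U) := by intro hc; exact hc.2 hvU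
        have hU' : ∀ w, w ∈ U ↔ w ∈ S ∨ w ∈ PySem.Set.add s₀ v := by
          intro w; rw [hU w, PySem.Set.mem_add]
          constructor
          · tauto
          · rintro (h | h | rfl) <;> tauto
        rw [if_pos hk, if_neg h2]
        simp only [pvDD]
        rw [if_neg h1]
        exact ih _ _ _ hU'
      · have hvU : v ∉ U := by rw [hU v]; tauto
        have h1 : pvKAll v = true ∧ v ∉ S := ⟨rfl, hS⟩
        have h2 : pvKNE v = true ∧ v ∉ U := ⟨hk.1, hvU⟩
        have hU' : ∀ w, w ∈ PySem.Set.add U v ↔ w ∈ PySem.Set.add S v ∨ w ∈ PySem.Set.add s₀ v := by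
          intro w; rw [PySem.Set.mem_add, hU w, PySem.Set.mem_add, PySem.Set.mem_add]
          tauto
        rw [if_pos hk, if_pos h2]
        simp only [pvDD]
        rw [if_pos h1, ih _ _ _ hU']
    · have hv : v = "" ∨ v ∈ s₀ := by
        by_cases hv0 : v = ""
        · exact Or.inl hv0
        · right
          by_contra hmem
          exact hk ⟨by simp [pvKNE, hv0], hmem⟩
      have h2 : ¬ (pvKNE v = true ∧ v ∉ U) := by
        rintro ⟨hkv, hnU⟩
        rcases hv with rfl | hmem
        · simp [pvKNE] at hkv
        · exact hnU ((hU v).2 (Or.inr hmem))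
      rw [if_neg hk, if_neg h2]
      exact ih _ _ _ hU

theorem pvMerge (a b : List String) :
    pvDD pvKAll PySem.Set.empty
        (pvDD pvKNE PySem.Set.empty a ++ pvDD pvKNE PySem.Set.empty b)
      = pvDD pvKNE PySem.Set.empty (a ++ b) := by
  have hemp : ∀ v : String, v ∉ (PySem.Set.empty : PySem.Set String) := by
    intro v; simp [PySem.Set.empty]
  have hX : pvDD pvKAll PySem.Set.empty (pvDD pvKNE PySem.Set.empty a)
      = pvDD pvKNE PySem.Set.empty a := by
    apply pvDD_all_ne
    intro v; simp
  have hU : ∀ v, v ∈ pvPost pvKNE PySem.Set.empty a ↔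
      v ∈ pvPost pvKAll PySem.Set.empty (pvDD pvKNE PySem.Set.empty a) ∨
        v ∈ (PySem.Set.empty : PySem.Set String) := by
    intro v
    rw [pvMem_post, pvMem_post, hX]
    simp
  rw [pvDD_append, pvDD_append, hX, pvDD_all_ne b _ _ _ hU]

theorem pvPair_drop (p s : String) (h : s = "" ∨ s = p) (seen : PySem.Set String) :
    pvDD pvKNE seen [p, s] = pvDD pvKNE seen [p] ∧
      pvPost pvKNE seen [p, s] = pvPost pvKNE seen [p] := by
  have hs : ∀ (seen' : PySem.Set String), p ∈ seen' ∨ s = "" → ¬ (pvKNE s = true ∧ s ∉ seen') := by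
    rintro seen' hmem ⟨hk, hn⟩
    rcases h with rfl | rfl
    · simp [pvKNE] at hk
    · rcases hmem with hmem | he
      · exact hn hmem
      · simp [pvKNE, he] at hk
  constructor <;> (
    simp only [pvDD, pvPost]
    by_cases hp : pvKNE p = true ∧ p ∉ seen
    · have hmem : p ∈ PySem.Set.add seen p := by rw [PySem.Set.mem_add]; tauto
      rw [if_pos hp, if_pos hp, if_neg (hs _ (Or.inl hmem))]
    · rcases h with rfl | rfl
      · rw [if_neg hp, if_neg hp, if_neg (hs _ (Or.inr rfl))]
      · rw [if_neg hp, if_neg hp])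

theorem pvLstrip0_zfill (clean : String)
    (hdig : ∀ c ∈ clean.toList, PySem.Chars.isdigit c = true) (t : Int) :
    pvLstrip0 (PySem.Str.zfill clean t) = pvLstrip0 clean := by
  unfold pvLstrip0
  rw [PySem.Str.toList_zfill]
  unfold PySem.Chars.zfill
  by_cases hle : t ≤ (clean.toList.length : Int)
  · rw [if_pos hle]
  · rw [if_neg hle]
    cases hcl : clean.toList with
    | nil => simp
    | cons c rest =>
      have hc : PySem.Chars.isdigit c = true := by
        apply hdig; rw [hcl]; exact List.mem_cons_self ..
      have hsign : ¬ (c = '+' ∨ c = '-') := by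
        rintro (rfl | rfl) <;> simp [PySem.Chars.isdigit] at hc
      simp only [if_neg hsign]
      rw [List.dropWhile_append, List.dropWhile_replicate]
      simp

theorem pvDD_var1 (p s : String) (seen : PySem.Set String) :
    pvDD pvKNE seen ([p] ++ (if s ≠ "" ∧ s ≠ p then [s] else [])) = pvDD pvKNE seen [p, s] ∧
      pvPost pvKNE seen ([p] ++ (if s ≠ "" ∧ s ≠ p then [s] else [])) = pvPost pvKNE seen [p, s] := by
  simp only [List.cons_append, List.nil_append]
  by_cases hc : s ≠ "" ∧ s ≠ p
  · rw [if_pos hc]; exact ⟨rfl, rfl⟩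
  · have h : s = "" ∨ s = p := by tauto
    obtain ⟨h1, h2⟩ := pvPair_drop p s h seen
    rw [if_neg hc]
    exact ⟨h1.symm, h2.symm⟩

theorem pvDD_var2 (p s : String) (seen : PySem.Set String) :
    pvDD pvKNE seen ([p] ++ (if s ≠ "" then [s] else [])) = pvDD pvKNE seen [p, s] ∧
      pvPost pvKNE seen ([p] ++ (if s ≠ "" then [s] else [])) = pvPost pvKNE seen [p, s] := by
  simp only [List.cons_append, List.nil_append]
  by_cases hc : s ≠ ""
  · rw [if_pos hc]; exact ⟨rfl, rfl⟩
  · have h : s = "" ∨ s = p := Or.inl (by tauto)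
    obtain ⟨h1, h2⟩ := pvPair_drop p s h seen
    rw [if_neg hc]
    exact ⟨h1.symm, h2.symm⟩

theorem pvLstrip0_def (s : String) :
    String.ofList (s.toList.dropWhile (· == '0')) = pvLstrip0 s := rfl

theorem pvVariants_dd (clean : String)
    (hdig : ∀ c ∈ clean.toList, PySem.Chars.isdigit c = true) (t : Int) (seen : PySem.Set String) :
    pvDD pvKNE seen (pvVariantsA clean t)
        = pvDD pvKNE seen
            [(if (clean.length : Int) ≥ t then PySem.Str.slice clean (some (-t)) none
              else PySem.Str.zfill clean t),
             String.ofList ((if (clean.length : Int) ≥ t then PySem.Str.slice clean (some (-t)) none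
              else PySem.Str.zfill clean t).toList.dropWhile (· == '0'))] ∧
      pvPost pvKNE seen (pvVariantsA clean t)
        = pvPost pvKNE seen
            [(if (clean.length : Int) ≥ t then PySem.Str.slice clean (some (-t)) none
              else PySem.Str.zfill clean t),
             String.ofList ((if (clean.length : Int) ≥ t then PySem.Str.slice clean (some (-t)) none
              else PySem.Str.zfill clean t).toList.dropWhile (· == '0'))] := by
  unfold pvVariantsA
  by_cases hge : (clean.length : Int) ≥ t
  · simp only [if_pos hge, pvLstrip0_def]
    exact pvDD_var1 _ _ seen
  · simp only [if_neg hge, pvLstrip0_def]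
    rw [pvLstrip0_zfill clean hdig t]
    exact pvDD_var2 _ _ seen

theorem pvUpperPF : PySem.Str.upper "PF" = "PF" := by decide

theorem pvUpperPJ : PySem.Str.upper "PJ" = "PJ" := by decide

theorem pvA_PF (d : String) : normalize_document_by_type d "PF"
    = (if pvOnlyDigits d = "" then [] else pvDedupNE (pvVariantsA (pvOnlyDigits d) 11)) := by
  rw [normalize_document_by_type.eq_def]
  simp [pvUpperPF]

theorem pvA_PJ (d : String) : normalize_document_by_type d "PJ"
    = (if pvOnlyDigits d = "" then [] else pvDedupNE (pvVariantsA (pvOnlyDigits d) 14)) := by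
  rw [normalize_document_by_type.eq_def]
  simp [pvUpperPJ]

-- ===== VERDICT (by name: the statement is the Claim_ definition above) =====
theorem normalize_document_by_type_spec : Claim_equal_normalize_document_by_type := by
  intro d pt _
  unfold Spec_normalize_document_by_type
  rw [normalize_document_by_type.eq_def]
  unfold normalize_document_by_type_alt
  simp only [pvOnlyDigits]
  set clean := String.ofList (d.toList.filter PySem.Chars.isdigit) with hclean
  have hdig : ∀ c ∈ clean.toList, PySem.Chars.isdigit c = true := by
    intro c hc
    rw [hclean, String.toList_ofList] at hc
    exact (List.mem_filter.mp hc).2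
  by_cases h0 : clean = ""
  · simp [h0]
  · simp only [h0, if_false]
    by_cases hPF : PySem.Str.upper pt = "PF"
    · simp only [hPF, if_true]
      unfold pvDedupNE
      rw [pvFoldNE_spec]
      rw [List.foldl_cons, List.foldl_nil]
      simp only []
      rw [pvFoldNE_spec]
      simp only [List.nil_append]
      exact (pvVariants_dd clean hdig 11 PySem.Set.empty).1
    · by_cases hPJ : PySem.Str.upper pt = "PJ"
      · have hne : ("PJ" : String) ≠ "PF" := by decide
        simp only [hPJ, if_true, if_neg hne]
        unfold pvDedupNE
        rw [pvFoldNE_spec]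
        rw [List.foldl_cons, List.foldl_nil]
        simp only []
        rw [pvFoldNE_spec]
        simp only [List.nil_append]
        exact (pvVariants_dd clean hdig 14 PySem.Set.empty).1
      · simp only [hPF, hPJ, if_false]
        rw [pvA_PF, pvA_PJ]
        simp only [pvOnlyDigits, ← hclean, h0, if_false]
        unfold pvDedup pvDedupNE
        rw [pvFoldAll_spec, pvFoldNE_spec, pvFoldNE_spec]
        simp only [List.nil_append]
        rw [pvMerge, pvDD_append]
        rw [(pvVariants_dd clean hdig 11 PySem.Set.empty).1,
            (pvVariants_dd clean hdig 11 PySem.Set.empty).2,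
            (pvVariants_dd clean hdig 14 _).1]
        rw [List.foldl_cons, List.foldl_cons, List.foldl_nil]
        rw [pvFoldNE_spec, pvFoldNE_spec]
        simp only [List.nil_append]
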